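-- pv_equiv track=rewrite | github.com/kimotostudio/lead-finder | src/scoring_rules.py | _count_keyword_score
-- ===== SOURCE A (Python) =====
-- from typing import Dict, Tuple, List
--
-- def _count_keyword_score(text: str, keyword_scores: Dict[str, int]) -> Tuple[int, List[str]]:
--     """
--     Count score from keyword matches.
--
--     Returns:
--         Tuple of (total_score, matched_keywords)
--     """
--     if not text:
--         return 0, []
--
--     total = 0
--     matched = []
--     text_lower = text.lower()
--
--     for keyword, score in keyword_scores.items():
--         if keyword.lower() in text_lower:
--             total += score
--             matched.append(keyword)
--
--     return total, matched
-- ===== SOURCE B (Python) =====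
-- def _count_keyword_score(text, keyword_scores):
--     """
--     Count score from keyword matches.
--
--     Returns:
--         Tuple of (total_score, matched_keywords)
--     """
--     if not text:
--         return 0, []
--
--     text_lower = text.lower()
--
--     max_len = 0
--     for keyword in keyword_scores:
--         max_len = max(max_len, len(keyword))
--
--     # hash index: every substring of the lowered text up to the max keyword length
--     substrings = {text_lower[i:i + length]
--                   for i in range(len(text_lower))
--                   for length in range(max_len + 1)}
--
--     total = 0
--     matched = []
--     for keyword, score in keyword_scores.items():
--         if keyword.lower() in substrings:
--             total += score
--             matched.append(keyword)
--
--     return total, matched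
-- ===== Notes on version B (the rewrite author's own statement) =====
-- stated objective: faster
-- what changed: B builds, in one pass over the lowered text, a hash set of all its substrings up to the maximum keyword length, so each keyword test becomes an O(1) average set lookup instead of A's substring scan of the whole text per keyword.
import Mathlib
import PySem

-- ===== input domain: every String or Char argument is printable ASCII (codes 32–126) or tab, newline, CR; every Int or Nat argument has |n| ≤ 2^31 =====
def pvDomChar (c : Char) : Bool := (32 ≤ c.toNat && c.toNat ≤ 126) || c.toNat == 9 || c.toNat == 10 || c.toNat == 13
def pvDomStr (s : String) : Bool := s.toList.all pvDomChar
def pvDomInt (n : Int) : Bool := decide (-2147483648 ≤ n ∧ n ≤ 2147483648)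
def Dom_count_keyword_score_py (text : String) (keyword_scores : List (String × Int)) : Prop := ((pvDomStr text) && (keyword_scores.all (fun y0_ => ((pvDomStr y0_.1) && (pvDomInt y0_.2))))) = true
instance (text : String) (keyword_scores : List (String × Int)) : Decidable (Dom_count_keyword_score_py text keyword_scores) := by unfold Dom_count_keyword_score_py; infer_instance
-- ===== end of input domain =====

-- B replaces A's per-keyword substring scan of the text by a set of all substrings
-- of the lowered text up to the maximum keyword length, built once, then set lookups.


-- ===== PORT A =====
def count_keyword_score_py (text : String) (keyword_scores : List (String × Int)) : Int × List String :=
  if text = "" then (0, [])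
  else
    let text_lower := PySem.Str.lower text
    keyword_scores.foldl (fun acc kv =>
      if PySem.Str.isIn (PySem.Str.lower kv.1) text_lower then (acc.1 + kv.2, acc.2 ++ [kv.1]) else acc)
      (0, [])

-- ===== PORT B =====
def count_keyword_score_py_alt (text : String) (keyword_scores : List (String × Int)) : Int × List String :=
  if text = "" then (0, [])
  else
    let text_lower := PySem.Str.lower text
    let max_len : Int := keyword_scores.foldl (fun m kv => max m (PySem.Str.len kv.1)) 0
    let substrings : PySem.Set String :=
      PySem.Set.ofList ((PySem.List.pyRange 0 (PySem.Str.len text_lower) 1).flatMap (fun i =>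
        (PySem.List.pyRange 0 (max_len + 1) 1).map (fun length =>
          PySem.Str.slice text_lower (some i) (some (i + length)))))
    keyword_scores.foldl (fun acc kv =>
      if PySem.Set.contains substrings (PySem.Str.lower kv.1) then (acc.1 + kv.2, acc.2 ++ [kv.1]) else acc)
      (0, [])

-- ===== PRECONDITION & SPEC =====
def Spec_count_keyword_score_py (text : String) (keyword_scores : List (String × Int)) (out : Int × List String) : Prop := out = count_keyword_score_py_alt text keyword_scores
instance (text : String) (keyword_scores : List (String × Int)) (out : Int × List String) : Decidable (Spec_count_keyword_score_py text keyword_scores out) := by unfold Spec_count_keyword_score_py; infer_instance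

-- ===== CLAIM (what is proved, stated in full; the proofs are below) =====
def Claim_equal_count_keyword_score_py : Prop := ∀ (text : String) (keyword_scores : List (String × Int)), Dom_count_keyword_score_py text keyword_scores → Spec_count_keyword_score_py text keyword_scores (count_keyword_score_py text keyword_scores)

-- ===== LEMMAS AND PROOFS =====

-- a clamped slice (drop/take) is an infix
lemma slice_isInfix (cs : List Char) (i L : Int) (hi : 0 ≤ i) (hL : 0 ≤ L) :
    PySem.List.slice cs (some i) (some (i + L)) <:+: cs := by
  rw [PySem.List.slice_toNat cs hi (by omega)]
  exact ((List.take_prefix _ (cs.drop i.toNat)).isInfix).trans (List.drop_suffix i.toNat cs).isInfix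

-- an infix of length ≤ M occurs among the slices cs[i:i+L], 0 ≤ i < |cs|, 0 ≤ L ≤ M (cs nonempty)
lemma infix_mem_slices (cs sub : List Char) (M : Int) (hne : cs ≠ [])
    (hlen : (sub.length : Int) ≤ M) (h : sub <:+: cs) :
    ∃ i ∈ PySem.List.pyRange 0 (cs.length : Int) 1, ∃ L ∈ PySem.List.pyRange 0 (M + 1) 1,
      PySem.List.slice cs (some i) (some (i + L)) = sub := by
  have hM : 0 ≤ M := le_trans (by positivity) hlen
  have hcs : 0 < cs.length := List.length_pos_iff.mpr hne
  rcases h with ⟨pre, suf, heq⟩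
  by_cases hsub : sub = []
  · refine ⟨0, ?_, 0, ?_, ?_⟩
    · rw [PySem.List.mem_pyRange_one]
      exact ⟨le_rfl, by exact_mod_cast hcs⟩
    · rw [PySem.List.mem_pyRange_one]; omega
    · rw [show ((0:Int) + 0) = 0 by norm_num, PySem.List.slice_toNat cs le_rfl le_rfl]
      simp [hsub]
  · have hdrop : cs.drop pre.length = sub ++ suf := by
      rw [← heq, List.append_assoc, List.drop_left]
    have hlencs : cs.length = pre.length + sub.length + suf.length := by
      rw [← heq]; simp; omega
    have hsublen : 0 < sub.length := List.length_pos_iff.mpr hsub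
    refine ⟨(pre.length : Int), ?_, (sub.length : Int), ?_, ?_⟩
    · rw [PySem.List.mem_pyRange_one]
      constructor
      · positivity
      · omega
    · rw [PySem.List.mem_pyRange_one]
      exact ⟨by positivity, by omega⟩
    · rw [PySem.List.slice_natCast_add, hdrop, List.take_left]

-- the membership test of B equals the substring test of A, for keywords in the list
lemma contains_eq_isIn (text : String) (keyword_scores : List (String × Int))
    (hne : ¬ text = "") (kv : String × Int) (hmem : kv ∈ keyword_scores) :
    PySem.Set.contains
      (PySem.Set.ofList ((PySem.List.pyRange 0 (PySem.Str.len (PySem.Str.lower text)) 1).flatMap (fun i =>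
        (PySem.List.pyRange 0 ((keyword_scores.foldl (fun m kv => max m (PySem.Str.len kv.1)) 0) + 1) 1).map (fun length =>
          PySem.Str.slice (PySem.Str.lower text) (some i) (some (i + length))))))
      (PySem.Str.lower kv.1)
      = PySem.Str.isIn (PySem.Str.lower kv.1) (PySem.Str.lower text) := by
  rw [Bool.eq_iff_iff, PySem.Set.contains_iff, PySem.Set.mem_ofList, PySem.Str.isIn_iff_infix]
  have hlen : (PySem.Str.len (PySem.Str.lower text)) = ((PySem.Str.lower text).toList.length : Int) := by
    simp
  constructor
  · rintro h
    rw [List.mem_flatMap] at h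
    obtain ⟨i, hi, h⟩ := h
    rw [List.mem_map] at h
    obtain ⟨L, hL, hslice⟩ := h
    rw [PySem.List.mem_pyRange_one] at hi hL
    have := slice_isInfix (PySem.Str.lower text).toList i L hi.1 hL.1
    rw [← hslice, PySem.Str.toList_slice]
    exact this
  · intro h
    have hbound : ((PySem.Str.lower kv.1).toList.length : Int)
        ≤ keyword_scores.foldl (fun m kv => max m (PySem.Str.len kv.1)) 0 := by
      have hmax := (PySem.List.le_foldl_max_int keyword_scores (fun kv => PySem.Str.len kv.1) 0).2 kv hmem
      have : PySem.Str.len kv.1 = ((PySem.Str.lower kv.1).toList.length : Int) := by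
        simp [PySem.Str.toList_lower, PySem.Chars.lower]
      omega
    have hne' : (PySem.Str.lower text).toList ≠ [] := by
      intro habs
      apply hne
      have h0 : (PySem.Str.lower text).toList.length = 0 := by rw [habs]; rfl
      rw [PySem.Str.toList_lower] at h0
      have h1 : text.toList.length = 0 := by simpa [PySem.Chars.lower] using h0
      exact String.toList_inj.mp (by simp [List.length_eq_zero_iff.mp h1])
    obtain ⟨i, hi, L, hL, hslice⟩ :=
      infix_mem_slices (PySem.Str.lower text).toList (PySem.Str.lower kv.1).toList _ hne' hbound h
    rw [List.mem_flatMap]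
    refine ⟨i, by rw [hlen]; exact hi, ?_⟩
    rw [List.mem_map]
    refine ⟨L, hL, ?_⟩
    apply String.toList_inj.mp
    rw [PySem.Str.toList_slice]
    exact hslice

-- ===== VERDICT (by name: the statement is the Claim_ definition above) =====
theorem count_keyword_score_py_spec : Claim_equal_count_keyword_score_py := by
  intro text keyword_scores _hdom
  unfold Spec_count_keyword_score_py count_keyword_score_py count_keyword_score_py_alt
  by_cases hne : text = ""
  · simp [hne]
  · simp only [hne, if_false]
    refine (PySem.List.foldl_congr_mem _ _ _ _ ?_).symm
    intro acc kv hmem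
    rw [contains_eq_isIn text keyword_scores hne kv hmem]
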